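-- pv_equiv track=rewrite | github.com/odegroot/advent-of-code | 2021/infi.py | tel_onderdelen
-- ===== SOURCE A (Python) =====
-- def tel_onderdelen(onderdelen, speelgoed):
--   sum = 0
--   for naam, aantal in onderdelen.items():
--     if naam in speelgoed:
--       mult = tel_onderdelen(speelgoed[naam], speelgoed)
--     else:
--       mult = 1
--     sum += aantal * mult
--   return sum
-- ===== SOURCE B (Python) =====
-- def tel_onderdelen(onderdelen, speelgoed):
--     # DP over the part DAG: each component's total is computed once and cached,
--     # instead of being recomputed at every reference as in the plain recursion.
--     memo = {}
--     def cost(naam):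
--         if naam not in memo:
--             memo[naam] = sum(a * (cost(p) if p in speelgoed else 1)
--                              for p, a in speelgoed[naam].items())
--         return memo[naam]
--     return sum(a * (cost(p) if p in speelgoed else 1) for p, a in onderdelen.items())
-- ===== Notes on version B (the rewrite author's own statement) =====
-- stated objective: alternative
-- what changed: Replaces A's plain top-down recursion (which re-expands a shared component at every reference) by a memoized DP over the part DAG: each component's count is computed once and cached in a dict, then reused.
import Mathlib
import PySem

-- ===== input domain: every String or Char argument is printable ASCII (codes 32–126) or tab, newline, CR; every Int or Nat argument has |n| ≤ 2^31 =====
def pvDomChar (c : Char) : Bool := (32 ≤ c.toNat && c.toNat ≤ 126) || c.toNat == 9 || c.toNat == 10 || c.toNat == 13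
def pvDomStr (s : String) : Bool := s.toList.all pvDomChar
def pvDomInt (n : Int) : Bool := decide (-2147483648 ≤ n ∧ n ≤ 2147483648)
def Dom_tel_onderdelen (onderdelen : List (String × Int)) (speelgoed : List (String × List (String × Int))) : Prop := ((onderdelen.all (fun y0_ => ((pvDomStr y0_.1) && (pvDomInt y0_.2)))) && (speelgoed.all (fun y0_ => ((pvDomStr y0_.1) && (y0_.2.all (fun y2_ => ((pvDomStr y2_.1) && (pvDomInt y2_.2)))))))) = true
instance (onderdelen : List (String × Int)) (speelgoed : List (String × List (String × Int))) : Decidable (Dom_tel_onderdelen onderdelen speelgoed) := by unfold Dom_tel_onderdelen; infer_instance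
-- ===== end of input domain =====

-- B replaces A's plain top-down recursion by a memoized DP over the part DAG: each
-- component's count is computed once and cached (objective: alternative algorithm;
-- A re-expands shared components at every reference).

-- ===== PORT A =====
-- A recurses without bound; the port carries a fuel of speelgoed.length + 1, which
-- under Pre_ (acyclic part graph) is never exhausted, so the port is exact on Pre_.
def telA (speelgoed : List (String × List (String × Int))) : Nat → List (String × Int) → Int
  | 0, _ => 0
  | fuel + 1, onderdelen =>
      onderdelen.foldl (fun s p =>
        let mult : Int :=
          match speelgoed.lookup p.1 with
          | some parts => telA speelgoed fuel parts
          | none => 1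
        s + p.2 * mult) 0

def tel_onderdelen (onderdelen : List (String × Int)) (speelgoed : List (String × List (String × Int))) : Int :=
  telA speelgoed (speelgoed.length + 1) onderdelen

-- ===== PORT B =====
-- A and B recurse to the same depth; the port carries the same fuel device as A's
-- port (speelgoed.length at the top), never exhausted under Pre_.
mutual
-- def cost(naam): if naam not in memo: memo[naam] = sum(...); return memo[naam]
def costF (sp : List (String × List (String × Int))) (fuel : Nat)
    (memo : PySem.Dict String Int) (naam : String) (parts : List (String × Int)) :
    Int × PySem.Dict String Int :=
  match memo.get? naam with
  | some v => (v, memo)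
  | none =>
    match fuel with
    | 0 => (0, memo)
    | f + 1 =>
      let r := sumCost sp f 0 memo parts
      (r.1, r.2.insert naam r.1)
termination_by (fuel, 0)

-- sum(a * (cost(p) if p in speelgoed else 1) for p, a in ...): the generator
-- evaluated left to right, threading the memo dict
def sumCost (sp : List (String × List (String × Int))) (fuel : Nat) (acc : Int)
    (memo : PySem.Dict String Int) :
    List (String × Int) → Int × PySem.Dict String Int
  | [] => (acc, memo)
  | p :: rest =>
    match sp.lookup p.1 with
    | some parts2 =>
      let r := costF sp fuel memo p.1 parts2
      sumCost sp fuel (acc + p.2 * r.1) r.2 rest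
    | none => sumCost sp fuel (acc + p.2 * 1) memo rest
termination_by parts => (fuel, parts.length + 1)
end

def tel_onderdelen_alt (onderdelen : List (String × Int)) (speelgoed : List (String × List (String × Int))) : Int :=
  (sumCost speelgoed speelgoed.length 0 PySem.Dict.empty onderdelen).1

-- ===== PRECONDITION & SPEC =====
-- distinct keys of the Python dict speelgoed (in insertion order)
def keysD (speelgoed : List (String × List (String × Int))) : List String :=
  PySem.List.dedup (speelgoed.map Prod.fst)

-- parts may only mention component names already peeled off (or non-component names);
-- lookup is last-match, matching Python's dict built from a possibly duplicated list
def okParts (speelgoed : List (String × List (String × Int))) (prev : List String) (parts : List (String × Int)) : Bool :=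
  parts.all (fun p => !(decide (p.1 ∈ keysD speelgoed)) || decide (p.1 ∈ prev))

def peelPred (speelgoed : List (String × List (String × Int))) (prev : List String) (k : String) : Bool :=
  match speelgoed.reverse.lookup k with
  | some parts => okParts speelgoed prev parts
  | none => true

def peel (speelgoed : List (String × List (String × Int))) : Nat → List String
  | 0 => []
  | i + 1 => (keysD speelgoed).filter (peelPred speelgoed (peel speelgoed i))

-- Pre_ excludes (a) association lists with duplicate keys in any of the dicts — such a
-- list is not the image of any Python dict (first-match vs last-wins is ambiguous) —
-- and (b) inputs where some onderdelen name expands through a cycle of speelgoed, on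
-- which A raises RecursionError (unreachable cycles stay admitted).
def Pre_tel_onderdelen (onderdelen : List (String × Int)) (speelgoed : List (String × List (String × Int))) : Prop :=
  (speelgoed.map Prod.fst).Nodup ∧
  (onderdelen.map Prod.fst).Nodup ∧
  (∀ kp ∈ speelgoed, (kp.2.map Prod.fst).Nodup) ∧
  (∀ p ∈ onderdelen, p.1 ∈ speelgoed.map Prod.fst → p.1 ∈ peel speelgoed speelgoed.length)

instance (onderdelen : List (String × Int)) (speelgoed : List (String × List (String × Int))) : Decidable (Pre_tel_onderdelen onderdelen speelgoed) := by unfold Pre_tel_onderdelen; infer_instance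

def pvWitness_tel_onderdelen : (List (String × Int)) × (List (String × List (String × Int))) :=
  ([("fiets", 2), ("step", 1)], [("fiets", [("wiel", 2), ("frame", 1)]), ("frame", [("buis", 3)])])

def Spec_tel_onderdelen (onderdelen : List (String × Int)) (speelgoed : List (String × List (String × Int))) (out : Int) : Prop := out = tel_onderdelen_alt onderdelen speelgoed
instance (onderdelen : List (String × Int)) (speelgoed : List (String × List (String × Int))) (out : Int) : Decidable (Spec_tel_onderdelen onderdelen speelgoed out) := by unfold Spec_tel_onderdelen; infer_instance

-- ===== CLAIM (what is proved, stated in full; the proofs are below) =====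
def Claim_equal_tel_onderdelen : Prop := ∀ (onderdelen : List (String × Int)) (speelgoed : List (String × List (String × Int))), Dom_tel_onderdelen onderdelen speelgoed → Pre_tel_onderdelen onderdelen speelgoed → Spec_tel_onderdelen onderdelen speelgoed (tel_onderdelen onderdelen speelgoed)


-- ===== LEMMAS AND PROOFS =====

-- Proof device: the bottom-up fixpoint iteration of a cost table over the component
-- graph; both ports are compared against it.
def rowCost (cost : PySem.Dict String Int) (parts : List (String × Int)) : Int :=
  parts.foldl (fun s p => s + p.2 * cost.getD p.1 1) 0

def stepCost (speelgoed : List (String × List (String × Int))) (cost : PySem.Dict String Int) : PySem.Dict String Int :=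
  speelgoed.foldl (fun d kp => d.insert kp.1 (rowCost cost kp.2)) PySem.Dict.empty

def iterC (speelgoed : List (String × List (String × Int))) : Nat → PySem.Dict String Int
  | 0 => PySem.Dict.empty
  | i + 1 => stepCost speelgoed (iterC speelgoed i)

theorem lookup_some_mem {α : Type} {sp : List (String × α)} {k : String} {v : α}
    (h : sp.lookup k = some v) : (k, v) ∈ sp := by
  induction sp with
  | nil => simp [List.lookup] at h
  | cons hd tl ih =>
    obtain ⟨k1, v1⟩ := hd
    by_cases hk : k = k1
    · subst hk
      simp only [List.lookup, beq_self_eq_true, Option.some.injEq] at h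
      subst h; exact List.mem_cons_self
    · have hb : (k == k1) = false := beq_false_of_ne hk
      simp only [List.lookup, hb] at h
      exact List.mem_cons_of_mem _ (ih h)

theorem lookup_none_iff {α : Type} (sp : List (String × α)) (k : String) :
    sp.lookup k = none ↔ k ∉ sp.map Prod.fst := by
  induction sp with
  | nil => simp [List.lookup]
  | cons hd tl ih =>
    obtain ⟨k1, v1⟩ := hd
    by_cases hk : k = k1
    · subst hk
      simp [List.lookup]
    · have hb : (k == k1) = false := beq_false_of_ne hk
      simp [List.lookup, hb, hk, ih]

theorem mem_lookup_nodup {α : Type} {sp : List (String × α)} {k : String} {v : α}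
    (hnd : (sp.map Prod.fst).Nodup) (h : (k, v) ∈ sp) : sp.lookup k = some v := by
  induction sp with
  | nil => simp at h
  | cons hd tl ih =>
    obtain ⟨k1, v1⟩ := hd
    simp only [List.map_cons, List.nodup_cons] at hnd
    rcases List.mem_cons.1 h with h1 | h1
    · obtain ⟨rfl, rfl⟩ := Prod.mk.injEq .. ▸ h1
      simp [List.lookup]
    · have hk : k ≠ k1 := by
        rintro rfl
        exact hnd.1 (by simpa using List.mem_map_of_mem (f := Prod.fst) h1)
      have hb : (k == k1) = false := beq_false_of_ne hk
      simp only [List.lookup, hb]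
      exact ih hnd.2 h1

theorem lookup_reverse_eq {α : Type} (sp : List (String × α)) (k : String)
    (hnd : (sp.map Prod.fst).Nodup) : sp.reverse.lookup k = sp.lookup k := by
  have hndr : (sp.reverse.map Prod.fst).Nodup := by
    rw [List.map_reverse]; exact List.nodup_reverse.2 hnd
  cases h : sp.lookup k with
  | some v =>
    exact mem_lookup_nodup hndr (by simpa using lookup_some_mem h)
  | none =>
    rw [lookup_none_iff] at h ⊢
    simpa using h

theorem items_stepCost (sp : List (String × List (String × Int))) (cost : PySem.Dict String Int)
    (hnd : (sp.map Prod.fst).Nodup) :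
    (stepCost sp cost).items = sp.map (fun kp => (kp.1, rowCost cost kp.2)) := by
  unfold stepCost
  have := PySem.Dict.items_foldl_insert_fresh (l := sp) (k := Prod.fst)
    (v := fun kp => rowCost cost kp.2) (d := PySem.Dict.empty)
    (by intro a _; simp [PySem.Dict.contains_empty]) hnd
  simpa using this

theorem nodup_keys_stepCost (sp : List (String × List (String × Int))) (cost : PySem.Dict String Int)
    (hnd : (sp.map Prod.fst).Nodup) : (stepCost sp cost).keys.Nodup := by
  have : (stepCost sp cost).keys = sp.map Prod.fst := by
    simp [PySem.Dict.keys, items_stepCost sp cost hnd]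
  rw [this]; exact hnd

theorem getD_stepCost_some {sp : List (String × List (String × Int))} (cost : PySem.Dict String Int)
    {k : String} {parts : List (String × Int)}
    (hnd : (sp.map Prod.fst).Nodup) (h : sp.lookup k = some parts) :
    (stepCost sp cost).getD k 1 = rowCost cost parts := by
  apply PySem.Dict.getD_of_mem_items
  · rw [items_stepCost sp cost hnd]
    exact List.mem_map_of_mem (lookup_some_mem h)
  · exact nodup_keys_stepCost sp cost hnd

theorem getD_iterC_none {sp : List (String × List (String × Int))} {k : String}
    (hnd : (sp.map Prod.fst).Nodup) (h : sp.lookup k = none) (i : Nat) :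
    (iterC sp i).getD k 1 = 1 := by
  cases i with
  | zero => simp [iterC, PySem.Dict.getD_empty]
  | succ i =>
    rw [iterC, PySem.Dict.getD_eq_get?_getD, (PySem.Dict.get?_eq_none_iff_not_mem_keys _ _).2]
    · rfl
    · have hkeys : (stepCost sp (iterC sp i)).keys = sp.map Prod.fst := by
        simp [PySem.Dict.keys, items_stepCost sp _ hnd]
      rw [hkeys]
      exact (lookup_none_iff sp k).1 h

theorem okParts_child {sp : List (String × List (String × Int))} {prev : List String}
    {parts : List (String × Int)} (hok : okParts sp prev parts = true)
    {p : String × Int} (hp : p ∈ parts) {q : List (String × Int)}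
    (hl : sp.lookup p.1 = some q) : p.1 ∈ prev := by
  have hcase := (List.all_eq_true.1 hok) p hp
  have hmem : p.1 ∈ keysD sp := by
    unfold keysD
    rw [PySem.List.dedup_eq_ofList, PySem.Set.mem_ofList]
    exact List.mem_map_of_mem (lookup_some_mem hl)
  simpa [hmem] using hcase

theorem peel_okParts {sp : List (String × List (String × Int))}
    (hnd : (sp.map Prod.fst).Nodup) {naam : String} {parts : List (String × Int)}
    (hl : sp.lookup naam = some parts) {i : Nat} (h : naam ∈ peel sp (i + 1)) :
    okParts sp (peel sp i) parts = true := by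
  rw [peel, List.mem_filter] at h
  have hok := h.2
  unfold peelPred at hok
  rw [lookup_reverse_eq sp naam hnd, hl] at hok
  exact hok

theorem okParts_mono {sp : List (String × List (String × Int))} {prev prev' : List String}
    (hsub : prev ⊆ prev') {parts : List (String × Int)}
    (h : okParts sp prev parts = true) : okParts sp prev' parts = true := by
  refine List.all_eq_true.2 fun p hp => ?_
  have h1 := (List.all_eq_true.1 h) p hp
  cases h4 : decide (p.1 ∈ keysD sp) with
  | false => simp
  | true =>
    simp only [h4, Bool.not_true, Bool.false_or, decide_eq_true_eq] at h1 ⊢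
    exact hsub h1

theorem peelPred_mono {sp : List (String × List (String × Int))} {prev prev' : List String}
    (hsub : prev ⊆ prev') {k : String} (h : peelPred sp prev k = true) :
    peelPred sp prev' k = true := by
  unfold peelPred at h ⊢
  cases hrl : sp.reverse.lookup k with
  | none => rfl
  | some parts => rw [hrl] at h; exact okParts_mono hsub h

theorem peel_succ_mono (sp : List (String × List (String × Int))) :
    ∀ i, peel sp i ⊆ peel sp (i + 1) := by
  intro i
  induction i with
  | zero => intro k hk; simp [peel] at hk
  | succ i ih =>
    intro k hk
    rw [peel, List.mem_filter] at hk ⊢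
    exact ⟨hk.1, peelPred_mono ih hk.2⟩

theorem peel_mono (sp : List (String × List (String × Int))) {i j : Nat} (hij : i ≤ j) :
    peel sp i ⊆ peel sp j := by
  induction hij with
  | refl => exact fun _ h => h
  | step _ ih => exact fun k hk => peel_succ_mono sp _ (ih hk)

-- the value a component stabilises to: any iterate from its peel level on agrees
theorem main_T (sp : List (String × List (String × Int)))
    (hnd : (sp.map Prod.fst).Nodup) (i : Nat) :
    ∀ k parts, sp.lookup k = some parts → k ∈ peel sp i →
      ∀ j, i ≤ j → (iterC sp j).getD k 1 = telA sp i parts := by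
  induction i with
  | zero => intro k parts _ hk; simp [peel] at hk
  | succ i ih =>
    intro k parts hlk hk j hij
    obtain ⟨j, rfl⟩ : ∃ j', j = j' + 1 := ⟨j - 1, by omega⟩
    have hok := peel_okParts hnd hlk hk
    rw [iterC, getD_stepCost_some _ hnd hlk]
    show rowCost (iterC sp j) parts = telA sp (i + 1) parts
    unfold rowCost telA
    apply PySem.List.foldl_congr_mem
    intro acc p hp
    cases hl : sp.lookup p.1 with
    | none => simp only [getD_iterC_none hnd hl j]
    | some parts2 =>
      have hc : p.1 ∈ peel sp i := okParts_child hok hp hl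
      simp only [ih p.1 parts2 hl hc j (by omega)]

-- memo invariant: every cached entry is a peeled component with its stable value
def GoodMemo (sp : List (String × List (String × Int))) (memo : PySem.Dict String Int) : Prop :=
  ∀ kv ∈ memo.items, kv.1 ∈ peel sp sp.length ∧ kv.2 = (iterC sp sp.length).getD kv.1 1

theorem W_eq {sp : List (String × List (String × Int))}
    (hnd : (sp.map Prod.fst).Nodup) {naam : String} {parts : List (String × Int)}
    (hl : sp.lookup naam = some parts) {f : Nat} (hf : f + 1 ≤ sp.length)
    (hok : okParts sp (peel sp f) parts = true) :
    (iterC sp sp.length).getD naam 1 =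
      parts.foldl (fun s p => s + p.2 * (iterC sp sp.length).getD p.1 1) 0 := by
  obtain ⟨m, hm⟩ : ∃ m, sp.length = m + 1 := ⟨sp.length - 1, by omega⟩
  conv_lhs => rw [hm, iterC, getD_stepCost_some _ hnd hl]
  show rowCost (iterC sp m) parts = _
  unfold rowCost
  apply PySem.List.foldl_congr_mem
  intro acc p hp
  cases hl2 : sp.lookup p.1 with
  | none => simp only [getD_iterC_none hnd hl2]
  | some parts2 =>
    have hc : p.1 ∈ peel sp f := okParts_child hok hp hl2
    rw [main_T sp hnd f p.1 parts2 hl2 hc m (by omega),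
        main_T sp hnd f p.1 parts2 hl2 hc sp.length (by omega)]

-- correctness of the memoised recursion, by mutual induction on the fuel:
-- CostFOk fuel says costF returns the stable value and preserves the memo invariant
def CostFOk (sp : List (String × List (String × Int))) (fuel : Nat) : Prop :=
  ∀ naam parts memo, fuel ≤ sp.length → sp.lookup naam = some parts →
    naam ∈ peel sp fuel → GoodMemo sp memo → memo.keys.Nodup →
    (costF sp fuel memo naam parts).1 = (iterC sp sp.length).getD naam 1 ∧
    GoodMemo sp (costF sp fuel memo naam parts).2 ∧
    (costF sp fuel memo naam parts).2.keys.Nodup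

theorem sumCost_ok {sp : List (String × List (String × Int))}
    (hnd : (sp.map Prod.fst).Nodup) {fuel : Nat} (hfn : fuel ≤ sp.length)
    (hA : CostFOk sp fuel) :
    ∀ parts acc memo, (∀ p ∈ parts, ∀ q, sp.lookup p.1 = some q → p.1 ∈ peel sp fuel) →
      GoodMemo sp memo → memo.keys.Nodup →
      (sumCost sp fuel acc memo parts).1 =
        parts.foldl (fun s p => s + p.2 * (iterC sp sp.length).getD p.1 1) acc ∧
      GoodMemo sp (sumCost sp fuel acc memo parts).2 ∧
      (sumCost sp fuel acc memo parts).2.keys.Nodup := by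
  intro parts
  induction parts with
  | nil => intro acc memo _ hg hn; simp only [sumCost]; exact ⟨rfl, hg, hn⟩
  | cons p rest ih =>
    intro acc memo hpeel hg hn
    cases hl : sp.lookup p.1 with
    | none =>
      simp only [sumCost, hl, List.foldl]
      rw [getD_iterC_none hnd hl]
      exact ih (acc + p.2 * 1) memo (fun q hq _ => hpeel q (List.mem_cons_of_mem _ hq) _) hg hn
    | some parts2 =>
      simp only [sumCost, hl, List.foldl]
      obtain ⟨hv, hg2, hn2⟩ :=
        hA p.1 parts2 memo hfn hl (hpeel p List.mem_cons_self parts2 hl) hg hn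
      rw [hv]
      exact ih _ _ (fun q hq _ => hpeel q (List.mem_cons_of_mem _ hq) _) hg2 hn2

theorem costF_ok (sp : List (String × List (String × Int)))
    (hnd : (sp.map Prod.fst).Nodup) : ∀ fuel, CostFOk sp fuel := by
  intro fuel
  induction fuel with
  | zero => intro naam parts memo _ _ hk; simp [peel] at hk
  | succ f ih =>
    intro naam parts memo hfn hl hk hg hn
    cases hm : memo.get? naam with
    | some v =>
      have hmem := PySem.Dict.mem_items_of_get?_eq_some _ hm
      refine ⟨?_, ?_, ?_⟩ <;> simp only [costF, hm]
      · simpa using (hg _ hmem).2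
      · exact hg
      · exact hn
    | none =>
      have hok := peel_okParts hnd hl hk
      obtain ⟨hv, hg2, hn2⟩ := sumCost_ok hnd (by omega) ih parts 0 memo
        (fun p hp q hq => okParts_child hok hp hq) hg hn
      have hval : (sumCost sp f 0 memo parts).1 = (iterC sp sp.length).getD naam 1 := by
        rw [hv, W_eq hnd hl hfn hok]
      refine ⟨?_, ?_, ?_⟩ <;> simp only [costF, hm]
      · exact hval
      · intro kv hkv
        rcases (PySem.Dict.mem_items_insert _ _ _ _).1 hkv with h1 | h1
        · subst h1
          refine ⟨?_, ?_⟩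
          · show naam ∈ peel sp sp.length
            exact peel_mono sp hfn hk
          · show (sumCost sp f 0 memo parts).1 = (iterC sp sp.length).getD naam 1
            exact hval
        · exact hg2 kv h1.1
      · exact PySem.Dict.nodup_keys_insert _ _ _ hn2

theorem tel_onderdelen_spec : Claim_equal_tel_onderdelen := by
  intro ond sp _ hpre
  obtain ⟨hnd, _, _, hall⟩ := hpre
  unfold Spec_tel_onderdelen tel_onderdelen tel_onderdelen_alt
  obtain ⟨hv, -, -⟩ := sumCost_ok hnd le_rfl (costF_ok sp hnd sp.length) ond 0 PySem.Dict.empty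
    (fun p hp q hq => hall p hp (List.mem_map_of_mem (lookup_some_mem hq)))
    (fun kv hkv => by cases hkv) List.nodup_nil
  rw [hv]
  show telA sp (sp.length + 1) ond = _
  unfold telA
  apply PySem.List.foldl_congr_mem
  intro acc p hp
  cases hl : sp.lookup p.1 with
  | none => simp only [getD_iterC_none hnd hl]
  | some parts =>
    have hk : p.1 ∈ peel sp sp.length :=
      hall p hp (List.mem_map_of_mem (lookup_some_mem hl))
    simp only [main_T sp hnd sp.length p.1 parts hl hk sp.length le_rfl]
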